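-- pv_equiv track=rewrite | github.com/dogfish000/Algorithm | 프로그래머스/2/131127. 할인 행사/할인 행사.py | solution
-- ===== SOURCE A (Python) =====
-- def solution(want, number, discount):
--     answer = 0
--
--     for i in range(0, len(discount) - 9):
--         tmp = discount[i: i + 10]
--         tmp_bool = True
--         for j in range(len(want)):
--             if tmp.count(want[j]) < number[j]:
--                 tmp_bool = False
--         if tmp_bool:
--             answer += 1
--
--
--
--     return answer
-- ===== SOURCE B (Python) =====
-- def solution(want, number, discount):
--     n = len(discount)
--     if n < 10:
--         return 0
--     ok = [True] * (n - 9)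
--     for w, k in zip(want, number):
--         pre = [0]
--         c = 0
--         for s in discount:
--             if s == w:
--                 c += 1
--             pre.append(c)
--         ok = [b and pre[i + 10] - pre[i] >= k for i, b in enumerate(ok)]
--     return sum(ok)
-- ===== Notes on version B (the rewrite author's own statement) =====
-- stated objective: faster
-- what changed: Replaces the per-window slice + list.count rescans with per-item prefix-count arrays, so each window check is a constant-time subtraction instead of a 10-element scan per want item.
import Mathlib
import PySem

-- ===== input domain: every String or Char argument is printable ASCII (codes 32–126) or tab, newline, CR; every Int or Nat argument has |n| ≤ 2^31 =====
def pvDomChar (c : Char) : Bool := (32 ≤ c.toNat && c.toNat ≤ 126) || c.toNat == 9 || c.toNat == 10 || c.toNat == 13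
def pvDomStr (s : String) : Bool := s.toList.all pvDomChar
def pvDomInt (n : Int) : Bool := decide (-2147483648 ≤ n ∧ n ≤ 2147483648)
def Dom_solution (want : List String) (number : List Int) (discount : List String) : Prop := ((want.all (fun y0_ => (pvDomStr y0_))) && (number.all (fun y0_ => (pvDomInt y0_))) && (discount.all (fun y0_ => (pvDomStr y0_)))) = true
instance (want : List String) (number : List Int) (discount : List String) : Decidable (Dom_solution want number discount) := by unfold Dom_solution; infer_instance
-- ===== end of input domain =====

-- B replaces A's per-window slice-and-count rescans with per-item prefix-count
-- arrays (each window test becomes one subtraction); equal on all inputs where A returns.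

-- ===== PORT A =====
def solution (want : List String) (number : List Int) (discount : List String) : Int :=
  (PySem.List.pyRange 0 ((discount.length : Int) - 9) 1).foldl (fun answer i =>
    let tmp := PySem.List.slice discount (some i) (some (i + 10))
    let tmp_bool := (PySem.List.pyRange 0 (want.length : Int) 1).foldl (fun b j =>
      if ((PySem.List.count tmp (PySem.List.pyGetD want j "") : Int) < PySem.List.pyGetD number j 0) then false else b) true
    if tmp_bool then answer + 1 else answer) 0

-- ===== PORT B =====
-- pre = [0]; c = 0; for s in discount: c += (s == w); pre.append(c)
def preCounts (w : String) (discount : List String) : List Int :=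
  (discount.foldl (fun (st : Int × List Int) s =>
      let c := if s = w then st.1 + 1 else st.1
      (c, st.2 ++ [c])) (0, [0])).2

def solution_alt (want : List String) (number : List Int) (discount : List String) : Int :=
  let n := discount.length
  if n < 10 then 0
  else
    let ok := (want.zip number).foldl (fun ok (wk : String × Int) =>
        let pre := preCounts wk.1 discount
        (PySem.List.enumerate ok).map (fun ib =>
          ib.2 && decide (wk.2 ≤ PySem.List.pyGetD pre (ib.1 + 10) 0 - PySem.List.pyGetD pre ib.1 0)))
      (List.replicate (n - 9) true)
    ok.foldl (fun acc b => if b then acc + 1 else acc) 0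

-- ===== PRECONDITION & SPEC =====
-- Pre_ excludes exactly the inputs where A raises IndexError: a window exists
-- (len(discount) >= 10) and want is longer than number, so number[j] goes out of range.
def Pre_solution (want : List String) (number : List Int) (discount : List String) : Prop :=
  want.length ≤ number.length ∨ discount.length < 10
instance (want : List String) (number : List Int) (discount : List String) : Decidable (Pre_solution want number discount) := by unfold Pre_solution; infer_instance

def pvWitness_solution : List String × List Int × List String :=
  (["a"], [1], ["a", "b", "a", "a", "a", "a", "a", "a", "a", "a"])

def Spec_solution (want : List String) (number : List Int) (discount : List String) (out : Int) : Prop := out = solution_alt want number discount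
instance (want : List String) (number : List Int) (discount : List String) (out : Int) : Decidable (Spec_solution want number discount out) := by unfold Spec_solution; infer_instance

-- ===== CLAIM (what is proved, stated in full; the proofs are below) =====
def Claim_equal_solution : Prop := ∀ (want : List String) (number : List Int) (discount : List String), Dom_solution want number discount → Pre_solution want number discount → Spec_solution want number discount (solution want number discount)

-- ===== LEMMAS AND PROOFS =====

-- the common per-window test: window i satisfies all (want[j], number[j]) demands
def pvCheck (want : List String) (number : List Int) (discount : List String) (i : Nat) : Bool :=
  (want.zip number).all (fun wk => decide (wk.2 ≤ ((((discount.drop i).take 10).count wk.1 : Int))))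

lemma pvAllCongr {α : Type} (l : List α) (p q : α → Bool) (h : ∀ x ∈ l, p x = q x) :
    l.all p = l.all q := by
  induction l with
  | nil => rfl
  | cons x xs ih =>
    rw [List.all_cons, List.all_cons, h x (by simp), ih (fun y hy => h y (by simp [hy]))]

lemma pvCountPCongr {α : Type} (l : List α) (p q : α → Bool) (h : ∀ x ∈ l, p x = q x) :
    l.countP p = l.countP q := by
  induction l with
  | nil => rfl
  | cons x xs ih =>
    rw [List.countP_cons, List.countP_cons, h x (by simp), ih (fun y hy => h y (by simp [hy]))]

lemma pvNotLt (a b : Int) : (!decide (a < b)) = decide (b ≤ a) := by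
  by_cases h : a < b
  · simp [h, not_le.mpr h]
  · simp [h]
    omega

lemma foldl_if_false {c : Int → Prop} [DecidablePred c] (l : List Int) (b : Bool) :
    l.foldl (fun b j => if c j then false else b) b = (b && l.all (fun j => !decide (c j))) := by
  induction l generalizing b with
  | nil => simp
  | cons x xs ih =>
    rw [List.foldl_cons, ih, List.all_cons]
    by_cases hx : c x <;> cases b <;> simp [hx]

lemma all_range_eq_all_zip (tmp : List String) :
    ∀ (want : List String) (number : List Int), want.length ≤ number.length →
    (List.range want.length).all (fun j => decide ((number.getD j 0) ≤ ((List.count (want.getD j "") tmp : Nat) : Int))) =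
    (want.zip number).all (fun wk => decide (wk.2 ≤ ((List.count wk.1 tmp : Nat) : Int))) := by
  intro want
  induction want with
  | nil => simp
  | cons w ws ih =>
    intro number h
    cases number with
    | nil => simp at h
    | cons k ks =>
      rw [List.length_cons, List.range_succ_eq_map, List.all_cons, List.all_map]
      have hfun : ∀ j ∈ List.range ws.length,
          ((fun j => decide (((k :: ks).getD j 0) ≤ ((List.count ((w :: ws).getD j "") tmp : Nat) : Int))) ∘ Nat.succ) j
            = (fun j => decide ((ks.getD j 0) ≤ ((List.count (ws.getD j "") tmp : Nat) : Int))) j := by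
        intro j _
        simp [Function.comp]
      rw [pvAllCongr _ _ _ hfun, ih ks (by simpa using h)]
      simp [List.zip_cons_cons]

lemma preCounts_spec (w : String) (xs : List String) :
    ∀ (c : Int) (acc : List Int),
    xs.foldl (fun (st : Int × List Int) s =>
        let c := if s = w then st.1 + 1 else st.1
        (c, st.2 ++ [c])) (c, acc)
      = (c + (xs.count w : Int),
         acc ++ (List.range xs.length).map (fun i => c + ((xs.take (i + 1)).count w : Int))) := by
  induction xs with
  | nil => simp
  | cons x xs ih =>
    intro c acc
    rw [List.foldl_cons]
    simp only []
    rw [ih]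
    have hc : (if x = w then c + 1 else c) = c + ((List.count w [x] : Nat) : Int) := by
      by_cases hx : x = w <;> simp [hx]
    have hcxs : ∀ (t : List String), List.count w (x :: t) = List.count w [x] + List.count w t := by
      intro t
      simpa using (List.count_append (l₁ := [x]) (l₂ := t) (a := w))
    rw [Prod.mk.injEq]
    constructor
    · rw [hc, hcxs xs]; push_cast; ring
    · rw [List.length_cons, List.range_succ_eq_map, List.map_cons, List.map_map,
          List.append_assoc, List.singleton_append]
      have htail : List.map (fun i => (if x = w then c + 1 else c) + ((List.count w (List.take (i + 1) xs) : Nat) : Int)) (List.range xs.length)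
          = List.map ((fun i => c + ((List.count w (List.take (i + 1) (x :: xs)) : Nat) : Int)) ∘ Nat.succ) (List.range xs.length) := by
        apply List.map_congr_left
        intro a _
        simp only [Function.comp]
        have ht : List.take (Nat.succ a + 1) (x :: xs) = x :: List.take (a + 1) xs := rfl
        rw [hc, ht, hcxs (List.take (a + 1) xs)]
        push_cast; ring
      rw [htail]
      have hhead : (if x = w then c + 1 else c) = c + ((List.count w (List.take (0 + 1) (x :: xs)) : Nat) : Int) := by
        rw [hc]; simp
      rw [hhead]

lemma preCounts_eq (w : String) (xs : List String) :
    preCounts w xs = (List.range (xs.length + 1)).map (fun i => ((xs.take i).count w : Int)) := by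
  unfold preCounts
  rw [preCounts_spec]
  rw [List.range_succ_eq_map, List.map_cons, List.map_map]
  simp [Function.comp]

lemma preCounts_getD (w : String) (xs : List String) (i : Nat) (h : i ≤ xs.length) :
    (preCounts w xs).getD i 0 = ((xs.take i).count w : Int) := by
  rw [preCounts_eq]
  rw [List.getD_eq_getElem?_getD, List.getElem?_map, List.getElem?_range (by omega)]
  simp

lemma count_window (xs : List String) (w : String) (i : Nat) (_h : i + 10 ≤ xs.length) :
    ((xs.take (i + 10)).count w : Int) - ((xs.take i).count w : Int)
      = (((xs.drop i).take 10).count w : Int) := by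
  rw [List.take_add, List.count_append]
  push_cast; ring

lemma ok_fold_step (discount : List String) (m : Nat) (hm : m + 9 ≤ discount.length)
    (q : Nat → Bool) (wk : String × Int) :
    (PySem.List.enumerate ((List.range m).map q)).map (fun ib =>
        ib.2 && decide (wk.2 ≤ PySem.List.pyGetD (preCounts wk.1 discount) (ib.1 + 10) 0
                          - PySem.List.pyGetD (preCounts wk.1 discount) ib.1 0))
    = (List.range m).map (fun i =>
        q i && decide (wk.2 ≤ (((discount.drop i).take 10).count wk.1 : Int))) := by
  rw [PySem.List.enumerate_eq_map_pyRange _ true, List.map_map]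
  have hlen : PySem.List.len ((List.range m).map q) = (m : Int) := by
    simp [PySem.List.len_eq]
  rw [hlen, PySem.List.pyRange_one 0 (m : Int), List.map_map]
  have hm0 : ((m : Int) - 0).toNat = m := by omega
  rw [hm0]
  apply List.map_congr_left
  intro k hk
  rw [List.mem_range] at hk
  simp only [Function.comp]
  have h1 : (0 : Int) + (k : Int) = ((k : Nat) : Int) := by ring
  have h2 : ((k : Nat) : Int) + 10 = (((k + 10 : Nat)) : Int) := by push_cast; ring
  simp only [h1, h2, PySem.List.pyGetD_natCast]
  rw [List.getD_eq_getElem?_getD, List.getElem?_map, List.getElem?_range hk]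
  rw [preCounts_getD _ _ _ (by omega), preCounts_getD _ _ _ (by omega)]
  rw [count_window _ _ _ (by omega)]
  simp

lemma ok_fold (discount : List String) (m : Nat) (hm : m + 9 ≤ discount.length) :
    ∀ (pairs : List (String × Int)) (q : Nat → Bool),
    pairs.foldl (fun ok (wk : String × Int) =>
        let pre := preCounts wk.1 discount
        (PySem.List.enumerate ok).map (fun ib =>
          ib.2 && decide (wk.2 ≤ PySem.List.pyGetD pre (ib.1 + 10) 0 - PySem.List.pyGetD pre ib.1 0)))
      ((List.range m).map q)
    = (List.range m).map (fun i =>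
        q i && pairs.all (fun wk => decide (wk.2 ≤ (((discount.drop i).take 10).count wk.1 : Int)))) := by
  intro pairs
  induction pairs with
  | nil => intro q; simp
  | cons p ps ih =>
    intro q
    rw [List.foldl_cons]
    simp only []
    rw [ok_fold_step discount m hm q p, ih]
    apply List.map_congr_left
    intro i _
    rw [List.all_cons]
    rw [Bool.and_assoc]

lemma solution_char (want : List String) (number : List Int) (discount : List String)
    (h : want.length ≤ number.length) :
    solution want number discount
      = ((List.range ((discount.length : Int) - 9).toNat).countP (pvCheck want number discount) : Int) := by
  unfold solution
  change List.foldl (fun (answer : Int) (i : Int) =>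
      if (PySem.List.pyRange 0 (want.length : Int) 1).foldl (fun b j =>
          if ((PySem.List.count (PySem.List.slice discount (some i) (some (i + 10))) (PySem.List.pyGetD want j "") : Int) < PySem.List.pyGetD number j 0) then false else b) true
        then answer + 1 else answer) 0 (PySem.List.pyRange 0 ((discount.length : Int) - 9) 1)
    = _
  have hbody : ∀ (answer : Int), ∀ i ∈ PySem.List.pyRange 0 ((discount.length : Int) - 9) 1,
      (fun (answer : Int) (i : Int) =>
        if (PySem.List.pyRange 0 (want.length : Int) 1).foldl (fun b j =>
            if ((PySem.List.count (PySem.List.slice discount (some i) (some (i + 10))) (PySem.List.pyGetD want j "") : Int) < PySem.List.pyGetD number j 0) then false else b) true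
          then answer + 1 else answer) answer i
      = (if (fun (i : Int) => pvCheck want number discount i.toNat) i then answer + 1 else answer) := by
    intro answer i hi
    rw [PySem.List.mem_pyRange_one] at hi
    obtain ⟨h0, _⟩ := hi
    obtain ⟨k, rfl⟩ : ∃ k : Nat, i = (k : Int) := ⟨i.toNat, (Int.toNat_of_nonneg h0).symm⟩
    simp only []
    have hcond : (PySem.List.pyRange 0 (want.length : Int) 1).foldl (fun b j =>
        if ((PySem.List.count (PySem.List.slice discount (some ((k : Nat) : Int)) (some (((k : Nat) : Int) + 10))) (PySem.List.pyGetD want j "") : Int) < PySem.List.pyGetD number j 0) then false else b) true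
        = pvCheck want number discount k := by
      have h10 : ((k : Nat) : Int) + 10 = ((k : Nat) : Int) + ((10 : Nat) : Int) := by push_cast; ring
      rw [h10, PySem.List.slice_natCast_add]
      rw [foldl_if_false, Bool.true_and]
      rw [PySem.List.pyRange_one 0 (want.length : Int), List.all_map]
      have hlen : ((want.length : Int) - 0).toNat = want.length := by omega
      rw [hlen]
      have hfun : ∀ j ∈ List.range want.length,
          ((fun j => !decide ((PySem.List.count (List.take 10 (List.drop k discount)) (PySem.List.pyGetD want j "") : Int) < PySem.List.pyGetD number j 0)) ∘ (fun (j : Nat) => (0 : Int) + j)) j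
            = (fun j => decide ((number.getD j 0) ≤ ((List.count (want.getD j "") (List.take 10 (List.drop k discount)) : Nat) : Int))) j := by
        intro j _
        simp only [Function.comp]
        have hj : (0 : Int) + (j : Int) = ((j : Nat) : Int) := by ring
        simp only [hj, PySem.List.pyGetD_natCast, PySem.List.count_eq, pvNotLt]
      rw [pvAllCongr _ _ _ hfun]
      rw [all_range_eq_all_zip (List.take 10 (List.drop k discount)) want number h]
      simp [pvCheck]
    rw [hcond]
    simp
  rw [PySem.List.foldl_congr_mem _ _
      (fun (answer : Int) (i : Int) => if (fun (i : Int) => pvCheck want number discount i.toNat) i then answer + 1 else answer) 0 hbody]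
  rw [PySem.List.foldl_if_add_one (fun (i : Int) => pvCheck want number discount i.toNat) _ 0]
  rw [PySem.List.pyRange_one 0 ((discount.length : Int) - 9), List.countP_map]
  simp only [sub_zero]
  have hcongr : ∀ k ∈ List.range ((discount.length : Int) - 9).toNat,
      ((fun (i : Int) => pvCheck want number discount i.toNat) ∘ (fun (k : Nat) => (0 : Int) + k)) k
        = pvCheck want number discount k := by
    intro k _
    simp [Function.comp]
  rw [pvCountPCongr _ _ _ hcongr]
  ring

lemma solution_alt_char (want : List String) (number : List Int) (discount : List String)
    (h10 : 10 ≤ discount.length) :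
    solution_alt want number discount
      = ((List.range (discount.length - 9)).countP (pvCheck want number discount) : Int) := by
  unfold solution_alt
  simp only []
  rw [if_neg (by omega)]
  have hrep : List.replicate (discount.length - 9) true
      = (List.range (discount.length - 9)).map (fun _ => true) := by
    simp [List.map_const']
  rw [hrep, ok_fold discount (discount.length - 9) (by omega) (want.zip number) (fun _ => true)]
  rw [PySem.List.foldl_if_add_one (fun b => b) _ 0]
  rw [List.countP_map]
  have : ((fun b => b) ∘ (fun i => true && (want.zip number).all
      (fun wk => decide (wk.2 ≤ (((discount.drop i).take 10).count wk.1 : Int)))))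
      = pvCheck want number discount := by
    funext i; simp [pvCheck]
  rw [this]; ring

-- ===== VERDICT (by name: the statement is the Claim_ definition above) =====
theorem solution_spec : Claim_equal_solution := by
  intro want number discount _ hpre
  unfold Spec_solution
  by_cases h10 : discount.length < 10
  · have hA : solution want number discount = 0 := by
      unfold solution
      have : PySem.List.pyRange 0 ((discount.length : Int) - 9) 1 = [] :=
        PySem.List.pyRange_one_eq_nil (by omega)
      rw [this]; rfl
    have hB : solution_alt want number discount = 0 := by
      unfold solution_alt
      simp only []
      rw [if_pos h10]
    rw [hA, hB]
  · have hwn : want.length ≤ number.length := by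
      rcases hpre with h | h
      · exact h
      · omega
    rw [solution_char want number discount hwn,
        solution_alt_char want number discount (by omega)]
    have hM : ((discount.length : Int) - 9).toNat = discount.length - 9 := by omega
    rw [hM]
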